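-- pv_equiv track=rewrite | github.com/SrOscuroBlck/TasteBudMVP-Backend | services/features.py | has_allergen
-- ===== SOURCE A (Python) =====
-- from typing import Dict, List, Optional
--
-- CANON_INGREDIENTS: Dict[str, Dict] = {
--     # ingredient: meta
--     "tomato": {"allergen": None, "axes": {"acidity": 0.6, "umami": 0.2}},
--     "mozzarella": {"allergen": "lactose", "axes": {"fattiness": 0.7, "umami": 0.3}},
--     "basil": {"allergen": None, "axes": {"acidity": 0.1}},
--     "dough": {"allergen": "gluten", "axes": {"sweet": 0.1}},
--     "beef": {"allergen": None, "axes": {"umami": 0.7, "fattiness": 0.5}},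
--     "chili": {"allergen": None, "axes": {"spicy": 0.9, "acidity": 0.2}},
--     "peanut": {"allergen": "peanut", "axes": {"fattiness": 0.6}},
--     "shrimp": {"allergen": "shellfish", "axes": {"umami": 0.6}},
--     "tofu": {"allergen": None, "axes": {"umami": 0.3}},
-- }
--
-- def canonicalize_ingredient(name: str) -> str:
--     return name.strip().lower().replace(" ", "_")
--
-- def has_allergen(allergies: List[str], ingredients: List[str], explicit_allergens: Optional[List[str]] = None) -> bool:
--     alls = set(map(str.lower, allergies))
--     if explicit_allergens:
--         if any(a.lower() in alls for a in explicit_allergens):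
--             return True
--     for ing in ingredients:
--         key = canonicalize_ingredient(ing)
--         meta = CANON_INGREDIENTS.get(key)
--         if meta and meta.get("allergen") and meta["allergen"].lower() in alls:
--             return True
--     return False
-- ===== SOURCE B (Python) =====
-- from typing import Dict, List, Optional
--
-- CANON_INGREDIENTS: Dict[str, Dict] = {
--     "tomato": {"allergen": None, "axes": {"acidity": 0.6, "umami": 0.2}},
--     "mozzarella": {"allergen": "lactose", "axes": {"fattiness": 0.7, "umami": 0.3}},
--     "basil": {"allergen": None, "axes": {"acidity": 0.1}},
--     "dough": {"allergen": "gluten", "axes": {"sweet": 0.1}},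
--     "beef": {"allergen": None, "axes": {"umami": 0.7, "fattiness": 0.5}},
--     "chili": {"allergen": None, "axes": {"spicy": 0.9, "acidity": 0.2}},
--     "peanut": {"allergen": "peanut", "axes": {"fattiness": 0.6}},
--     "shrimp": {"allergen": "shellfish", "axes": {"umami": 0.6}},
--     "tofu": {"allergen": None, "axes": {"umami": 0.3}},
-- }
--
-- def canonicalize_ingredient(name: str) -> str:
--     return name.strip().lower().replace(" ", "_")
--
-- def has_allergen(allergies: List[str], ingredients: List[str], explicit_allergens: Optional[List[str]] = None) -> bool:
--     alls = set(map(str.lower, allergies))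
--     if explicit_allergens and not alls.isdisjoint(a.lower() for a in explicit_allergens):
--         return True
--     # Invert the lookup direction: instead of resolving every ingredient through the
--     # table, build the set of canonical ingredient names once and scan the (small,
--     # fixed) table for an allergen-carrying entry that is both present and relevant.
--     canon = {canonicalize_ingredient(i) for i in ingredients}
--     for key, meta in CANON_INGREDIENTS.items():
--         al = meta.get("allergen")
--         if al and key in canon and al.lower() in alls:
--             return True
--     return False
-- ===== Notes on version B (the rewrite author's own statement) =====
-- stated objective: alternative
-- what changed: B inverts the traversal: it builds the set of canonicalized ingredient names once and scans the static CANON_INGREDIENTS table for an allergen-carrying entry whose key is present, instead of A's per-ingredient dict lookups; the explicit check becomes one isdisjoint test.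
import Mathlib
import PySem

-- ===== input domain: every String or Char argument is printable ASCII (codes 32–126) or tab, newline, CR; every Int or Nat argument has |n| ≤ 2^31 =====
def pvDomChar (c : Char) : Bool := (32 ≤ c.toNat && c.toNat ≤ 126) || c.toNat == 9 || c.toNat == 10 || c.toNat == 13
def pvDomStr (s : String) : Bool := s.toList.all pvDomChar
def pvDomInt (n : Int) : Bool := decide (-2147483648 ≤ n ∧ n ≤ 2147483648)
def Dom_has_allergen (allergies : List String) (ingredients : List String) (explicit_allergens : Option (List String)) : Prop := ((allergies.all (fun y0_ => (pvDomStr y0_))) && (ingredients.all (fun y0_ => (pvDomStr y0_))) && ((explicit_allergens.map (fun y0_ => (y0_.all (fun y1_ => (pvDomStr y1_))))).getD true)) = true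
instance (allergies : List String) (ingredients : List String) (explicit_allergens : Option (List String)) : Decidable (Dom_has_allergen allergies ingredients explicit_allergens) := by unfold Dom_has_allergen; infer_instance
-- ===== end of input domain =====

-- B inverts the traversal: it builds the set of canonical ingredient names once and scans the
-- static table for a present allergen-carrying entry (objective: alternative, same cost).

-- Shared module context: canonicalize_ingredient, and CANON_INGREDIENTS modeled by its "allergen"
-- field only (the "axes" floats are never read by has_allergen; 'meta' is truthy iff the key is
-- present, 'meta.get("allergen")' / 'al' is truthy iff the field is a non-None, nonempty string —
-- all allergen strings in the table are nonempty, so Option String is exact here).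
def pvCanon (name : String) : String :=
  PySem.Str.replace (PySem.Str.lower (PySem.Str.strip name)) " " "_"

def pvTable : List (String × Option String) :=
  [("tomato", none), ("mozzarella", some "lactose"), ("basil", none), ("dough", some "gluten"),
   ("beef", none), ("chili", none), ("peanut", some "peanut"), ("shrimp", some "shellfish"),
   ("tofu", none)]

def pvCanonAllergen : PySem.Dict String (Option String) := PySem.Dict.ofList pvTable

-- ===== PORT A =====
def has_allergen (allergies : List String) (ingredients : List String) (explicit_allergens : Option (List String)) : Bool :=
  let alls : PySem.Set String := PySem.Set.ofList (allergies.map PySem.Str.lower)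
  -- the for-loop over ingredients with early 'return True' (CANON_INGREDIENTS.get + truthiness)
  let loop := ingredients.any (fun ing =>
    match PySem.Dict.get? pvCanonAllergen (pvCanon ing) with
    | some (some al) => PySem.Set.contains alls (PySem.Str.lower al)
    | _ => false)
  match explicit_allergens with
  | some ex =>
      -- 'if explicit_allergens:' (truthy = nonempty) then 'if any(...): return True'
      if !ex.isEmpty && ex.any (fun a => PySem.Set.contains alls (PySem.Str.lower a)) then true
      else loop
  | none => loop

-- ===== PORT B =====
def has_allergen_alt (allergies : List String) (ingredients : List String) (explicit_allergens : Option (List String)) : Bool :=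
  let alls : PySem.Set String := PySem.Set.ofList (allergies.map PySem.Str.lower)
  let explicitHit : Bool :=
    match explicit_allergens with
    | some ex => !ex.isEmpty && !(PySem.Set.isdisjoint alls (ex.map PySem.Str.lower))
    | none => false
  if explicitHit then true
  else
    -- canon = {canonicalize_ingredient(i) for i in ingredients}
    let canon : PySem.Set String := PySem.Set.ofList (ingredients.map pvCanon)
    -- for key, meta in CANON_INGREDIENTS.items(): if al and key in canon and al.lower() in alls
    pvTable.any (fun kv =>
      match kv.2 with
      | some al => PySem.Set.contains canon kv.1 && PySem.Set.contains alls (PySem.Str.lower al)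
      | none => false)

-- ===== PRECONDITION & SPEC =====
def Spec_has_allergen (allergies : List String) (ingredients : List String) (explicit_allergens : Option (List String)) (out : Bool) : Prop := out = has_allergen_alt allergies ingredients explicit_allergens
instance (allergies : List String) (ingredients : List String) (explicit_allergens : Option (List String)) (out : Bool) : Decidable (Spec_has_allergen allergies ingredients explicit_allergens out) := by unfold Spec_has_allergen; infer_instance

-- ===== CLAIM =====
def Claim_equal_has_allergen : Prop := ∀ (allergies : List String) (ingredients : List String) (explicit_allergens : Option (List String)), Dom_has_allergen allergies ingredients explicit_allergens → Spec_has_allergen allergies ingredients explicit_allergens (has_allergen allergies ingredients explicit_allergens)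

-- ===== LEMMAS AND PROOFS =====

-- the concrete table has distinct keys and is its own items list
theorem pv_items : pvCanonAllergen.items = pvTable := by decide

theorem pv_nodup : pvCanonAllergen.keys.Nodup := by decide

-- A's dict lookup hits some allergen al iff the table carries (pvCanon ing, some al)
theorem lookup_iff (ing : String) (al : String) :
    PySem.Dict.get? pvCanonAllergen (pvCanon ing) = some (some al) ↔ (pvCanon ing, some al) ∈ pvTable := by
  rw [← pv_items]
  exact PySem.Dict.get?_eq_some_iff_mem_items pvCanonAllergen _ _ pv_nodup

-- the two ingredient-side scans find the same allergens
theorem loops_iff (ingredients : List String) (alls : PySem.Set String) :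
    (ingredients.any (fun ing =>
      match PySem.Dict.get? pvCanonAllergen (pvCanon ing) with
      | some (some al) => PySem.Set.contains alls (PySem.Str.lower al)
      | _ => false)) = true ↔
    (pvTable.any (fun kv =>
      match kv.2 with
      | some al => PySem.Set.contains (PySem.Set.ofList (ingredients.map pvCanon)) kv.1
            && PySem.Set.contains alls (PySem.Str.lower al)
      | none => false)) = true := by
  simp only [List.any_eq_true]
  constructor
  · rintro ⟨ing, hing, h⟩
    cases hget : PySem.Dict.get? pvCanonAllergen (pvCanon ing) with
    | none => rw [hget] at h; cases h
    | some o =>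
        cases o with
        | none => rw [hget] at h; cases h
        | some al =>
            rw [hget] at h
            refine ⟨(pvCanon ing, some al), (lookup_iff ing al).1 hget, ?_⟩
            simp only [Bool.and_eq_true]
            refine ⟨?_, h⟩
            rw [PySem.Set.contains_iff, PySem.Set.mem_ofList]
            exact List.mem_map.2 ⟨ing, hing, rfl⟩
  · rintro ⟨⟨k, oal⟩, hkv, h⟩
    cases oal with
    | none => cases h
    | some al =>
        simp only [Bool.and_eq_true] at h
        obtain ⟨hk, ha⟩ := h
        rw [PySem.Set.contains_iff, PySem.Set.mem_ofList] at hk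
        obtain ⟨ing, hing, rfl⟩ := List.mem_map.1 hk
        refine ⟨ing, hing, ?_⟩
        rw [(lookup_iff ing al).2 hkv]
        exact ha

-- A's explicit any-scan and B's isdisjoint test agree
theorem explicit_eq (ex : List String) (alls : PySem.Set String) :
    (ex.any (fun a => PySem.Set.contains alls (PySem.Str.lower a)))
      = !(PySem.Set.isdisjoint alls (ex.map PySem.Str.lower)) := by
  rw [Bool.eq_iff_iff, Bool.not_eq_true', Bool.eq_false_iff]
  simp only [List.any_eq_true, Ne, PySem.Set.isdisjoint_iff]
  constructor
  · rintro ⟨a, ha, hc⟩ h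
    exact h _ ((PySem.Set.contains_iff _ _).1 hc) (List.mem_map.2 ⟨a, ha, rfl⟩)
  · intro h
    by_contra hno
    push Not at hno
    apply h
    intro x hx hmem
    obtain ⟨a, ha, rfl⟩ := List.mem_map.1 hmem
    exact absurd ((PySem.Set.contains_iff _ _).2 hx) (by simpa using hno a ha)

-- common characterization target
set_option maxHeartbeats 1600000 in
theorem a_true_iff (allergies ingredients : List String) (explicit_allergens : Option (List String)) :
    has_allergen allergies ingredients explicit_allergens = true ↔
      ((match explicit_allergens with
        | some ex => (!ex.isEmpty && !(PySem.Set.isdisjoint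
              (PySem.Set.ofList (allergies.map PySem.Str.lower)) (ex.map PySem.Str.lower)))
        | none => false) = true
       ∨ (pvTable.any (fun kv =>
            match kv.2 with
            | some al => PySem.Set.contains (PySem.Set.ofList (ingredients.map pvCanon)) kv.1
                  && PySem.Set.contains (PySem.Set.ofList (allergies.map PySem.Str.lower)) (PySem.Str.lower al)
            | none => false)) = true) := by
  unfold has_allergen
  cases explicit_allergens with
  | none =>
      simp only [Bool.false_eq_true, false_or]
      exact loops_iff ingredients (PySem.Set.ofList (allergies.map PySem.Str.lower))
  | some ex =>
      simp only
      rw [explicit_eq ex]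
      by_cases hx : (!ex.isEmpty && !(PySem.Set.isdisjoint
          (PySem.Set.ofList (allergies.map PySem.Str.lower)) (ex.map PySem.Str.lower))) = true
      · rw [if_pos hx]
        simp [hx]
      · rw [if_neg hx]
        rw [Bool.not_eq_true] at hx
        simp only [hx, Bool.false_eq_true, false_or]
        exact loops_iff ingredients (PySem.Set.ofList (allergies.map PySem.Str.lower))

set_option maxHeartbeats 1600000 in
theorem b_true_iff (allergies ingredients : List String) (explicit_allergens : Option (List String)) :
    has_allergen_alt allergies ingredients explicit_allergens = true ↔
      ((match explicit_allergens with
        | some ex => (!ex.isEmpty && !(PySem.Set.isdisjoint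
              (PySem.Set.ofList (allergies.map PySem.Str.lower)) (ex.map PySem.Str.lower)))
        | none => false) = true
       ∨ (pvTable.any (fun kv =>
            match kv.2 with
            | some al => PySem.Set.contains (PySem.Set.ofList (ingredients.map pvCanon)) kv.1
                  && PySem.Set.contains (PySem.Set.ofList (allergies.map PySem.Str.lower)) (PySem.Str.lower al)
            | none => false)) = true) := by
  unfold has_allergen_alt
  by_cases hx : (match explicit_allergens with
        | some ex => (!ex.isEmpty && !(PySem.Set.isdisjoint
              (PySem.Set.ofList (allergies.map PySem.Str.lower)) (ex.map PySem.Str.lower)))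
        | none => false) = true
  · rw [if_pos hx]
    simp [hx]
  · rw [if_neg hx]
    rw [Bool.not_eq_true] at hx
    simp only [hx, Bool.false_eq_true, false_or]

-- ===== VERDICT =====
theorem has_allergen_spec : Claim_equal_has_allergen := by
  intro allergies ingredients explicit_allergens _
  unfold Spec_has_allergen
  rw [Bool.eq_iff_iff, a_true_iff, b_true_iff]
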